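-- pv_equiv track=rewrite | github.com/Leoberium/BA | Chapter7/BA7E.py | min_non_diagonal_element
-- ===== SOURCE A (Python) =====
-- def min_non_diagonal_element(d):
--     i, j = -1, -1
--     m = 10**10
--     for key1 in d:
--         for key2 in d[key1]:
--             if key1 == key2:
--                 continue
--             if d[key1][key2] < m:
--                 m = d[key1][key2]
--                 i, j = key1, key2
--     return i, j
-- ===== SOURCE B (Python) =====
-- def min_non_diagonal_element(d):
--     # phase 1: per-row earliest-column off-diagonal minimum
--     rows = []
--     for key1 in d:
--         rm, rj = 10**10, -1
--         for key2 in d[key1]: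
--             if key2 != key1 and d[key1][key2] < rm:
--                 rm, rj = d[key1][key2], key2
--         rows.append((key1, rm, rj))
--     # phase 2: pick first row that strictly improves the running minimum
--     m, i, j = 10**10, -1, -1
--     for key1, rm, rj in rows:
--         if rm < m:
--             m, i, j = rm, key1, rj
--     return i, j
-- ===== Notes on version B (the rewrite author's own statement) =====
-- stated objective: alternative
-- what changed: Replaces the single flat double loop with a two-phase reduction: first compute each row's earliest off-diagonal minimum as a (row, value, col) candidate, then scan the per-row candidates once keeping the first strict improvement.
import Mathlib
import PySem

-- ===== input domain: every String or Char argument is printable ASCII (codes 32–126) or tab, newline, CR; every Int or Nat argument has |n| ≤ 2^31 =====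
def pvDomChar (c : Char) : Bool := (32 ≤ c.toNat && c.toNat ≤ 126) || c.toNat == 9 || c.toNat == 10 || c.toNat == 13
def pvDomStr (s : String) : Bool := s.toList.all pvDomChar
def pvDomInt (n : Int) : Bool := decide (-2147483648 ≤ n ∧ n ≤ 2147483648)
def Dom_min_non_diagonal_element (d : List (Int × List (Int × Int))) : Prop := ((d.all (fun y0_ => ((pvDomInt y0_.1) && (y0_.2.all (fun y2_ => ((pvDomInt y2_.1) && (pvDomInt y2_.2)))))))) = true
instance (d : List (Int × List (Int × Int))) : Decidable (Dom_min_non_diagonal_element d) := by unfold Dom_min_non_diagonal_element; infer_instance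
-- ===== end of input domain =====

-- B replaces A's flat double loop by a two-phase reduction (per-row minima, then a scan
-- of the per-row candidates); same cost, different decomposition (objective: alternative).

-- ===== PORT A =====
-- A's flat double loop over the dict: state (m, i, j), one step per inner entry.
def pvAStep (key1 : Int) (st : Int × Int × Int) (p : Int × Int) : Int × Int × Int :=
  if key1 = p.1 then st
  else if p.2 < st.1 then (p.2, key1, p.1) else st

def min_non_diagonal_element (d : List (Int × List (Int × Int))) : Int × Int :=
  let st := d.foldl (fun st row => row.2.foldl (pvAStep row.1) st) ((10:Int)^10, -1, -1)
  (st.2.1, st.2.2)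

-- ===== PORT B =====
-- phase 1 inner loop: earliest off-diagonal minimum of one row, sentinel 10^10
def pvRowMin (key1 : Int) (row : List (Int × Int)) : Int × Int :=
  row.foldl (fun st p => if p.1 ≠ key1 ∧ p.2 < st.1 then (p.2, p.1) else st) ((10:Int)^10, -1)

-- phase 2 step: first strict improvement among the per-row candidates
def pvBStep (st : Int × Int × Int) (r : Int × Int × Int) : Int × Int × Int :=
  if r.2.1 < st.1 then (r.2.1, r.1, r.2.2) else st

def min_non_diagonal_element_alt (d : List (Int × List (Int × Int))) : Int × Int :=
  let rows := d.map (fun r => (r.1, pvRowMin r.1 r.2))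
  let best := rows.foldl pvBStep ((10:Int)^10, -1, -1)
  (best.2.1, best.2.2)

-- ===== PRECONDITION & SPEC =====
def Spec_min_non_diagonal_element (d : List (Int × List (Int × Int))) (out : Int × Int) : Prop := out = min_non_diagonal_element_alt d
instance (d : List (Int × List (Int × Int))) (out : Int × Int) : Decidable (Spec_min_non_diagonal_element d out) := by unfold Spec_min_non_diagonal_element; infer_instance

-- ===== CLAIM (what is proved, stated in full; the proofs are below) =====
def Claim_equal_min_non_diagonal_element : Prop := ∀ (d : List (Int × List (Int × Int))), Dom_min_non_diagonal_element d → Spec_min_non_diagonal_element d (min_non_diagonal_element d)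

-- ===== LEMMAS AND PROOFS =====

-- Key relation: A's inner fold started from the "combined" state equals combining with
-- B's running row minimum.  Holds for arbitrary accumulators on both sides.
theorem pv_inner (key1 : Int) (row : List (Int × Int)) :
    ∀ (m i j rm rj : Int),
      row.foldl (pvAStep key1) (pvBStep (m, i, j) (key1, rm, rj))
        = pvBStep (m, i, j) (key1, (row.foldl (fun st p => if p.1 ≠ key1 ∧ p.2 < st.1 then (p.2, p.1) else st) (rm, rj))) := by
  induction row with
  | nil => intro m i j rm rj; rfl
  | cons p rest ih =>
    intro m i j rm rj
    simp only [List.foldl_cons]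
    by_cases hk : p.1 = key1
    · have h1 : pvAStep key1 (pvBStep (m, i, j) (key1, rm, rj)) p = pvBStep (m, i, j) (key1, rm, rj) := by
        simp [pvAStep, hk.symm]
      have h2 : (if p.1 ≠ key1 ∧ p.2 < rm then (p.2, p.1) else (rm, rj)) = (rm, rj) := by
        simp [hk]
      rw [h1, h2]; exact ih m i j rm rj
    · -- off-diagonal entry
      by_cases hrm : p.2 < rm
      · have h2 : (if p.1 ≠ key1 ∧ p.2 < rm then (p.2, p.1) else (rm, rj)) = (p.2, p.1) := by
          simp [hk, hrm]
        by_cases hm : p.2 < m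
        · have h1 : pvAStep key1 (pvBStep (m, i, j) (key1, rm, rj)) p = (p.2, key1, p.1) := by
            unfold pvBStep pvAStep
            by_cases h : rm < m <;> simp [h, hrm, hm, fun h' => Ne.symm hk h']
          have h3 : pvBStep (m, i, j) (key1, p.2, p.1) = (p.2, key1, p.1) := by
            simp [pvBStep, hm]
          rw [h1, h2, ← ih m i j p.2 p.1, h3]
        · -- m ≤ p.2 < rm : neither effective state changes
          have hnr : ¬ rm < m := by omega
          have h1 : pvAStep key1 (pvBStep (m, i, j) (key1, rm, rj)) p = (m, i, j) := by
            unfold pvBStep pvAStep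
            simp [hnr, hm, fun h' => Ne.symm hk h']
          have h3 : pvBStep (m, i, j) (key1, p.2, p.1) = (m, i, j) := by
            simp [pvBStep, hm]
          rw [h1, h2, ← ih m i j p.2 p.1, h3]
      · -- rm ≤ p.2 : no update anywhere (A's current m is min(m, rm) ≤ rm ≤ p.2)
        have h2 : (if p.1 ≠ key1 ∧ p.2 < rm then (p.2, p.1) else (rm, rj)) = (rm, rj) := by
          simp [hrm]
        have h1 : pvAStep key1 (pvBStep (m, i, j) (key1, rm, rj)) p = pvBStep (m, i, j) (key1, rm, rj) := by
          unfold pvBStep pvAStep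
          by_cases h : rm < m <;> simp [h, hrm, fun h' => Ne.symm hk h'] <;> omega
        rw [h1, h2]; exact ih m i j rm rj

theorem pv_outer (d : List (Int × List (Int × Int))) :
    ∀ (m i j : Int), m ≤ 10 ^ 10 →
      d.foldl (fun st row => row.2.foldl (pvAStep row.1) st) (m, i, j)
        = (d.map (fun r => (r.1, pvRowMin r.1 r.2))).foldl pvBStep (m, i, j) := by
  induction d with
  | nil => intro m i j _; rfl
  | cons r rest ih =>
    intro m i j hm
    simp only [List.foldl_cons, List.map_cons]
    have hinit : pvBStep (m, i, j) (r.1, (10:Int)^10, -1) = (m, i, j) := by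
      have h1 : pvBStep (m, i, j) (r.1, (10:Int)^10, -1)
          = if (10:Int)^10 < m then ((10:Int)^10, r.1, -1) else (m, i, j) := rfl
      rw [h1, if_neg (by omega)]
    have hstep : r.2.foldl (pvAStep r.1) (m, i, j)
        = pvBStep (m, i, j) (r.1, pvRowMin r.1 r.2) := by
      conv_lhs => rw [← hinit]
      rw [pv_inner]
      rfl
    rw [hstep]
    rcases hrm : pvRowMin r.1 r.2 with ⟨rm, rj⟩
    have h1 : pvBStep (m, i, j) (r.1, rm, rj) = if rm < m then (rm, r.1, rj) else (m, i, j) := rfl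
    rw [h1]
    split_ifs with h
    · exact ih rm r.1 rj (by omega)
    · exact ih m i j hm

-- ===== VERDICT (by name: the statement is the Claim_ definition above) =====
theorem min_non_diagonal_element_spec : Claim_equal_min_non_diagonal_element := by
  intro d _
  unfold Spec_min_non_diagonal_element min_non_diagonal_element min_non_diagonal_element_alt
  rw [pv_outer d ((10:Int)^10) (-1) (-1) le_rfl]
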